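-- pv_equiv track=rewrite | github.com/hong0002/Baekjoon | 기타/Better Dice.py | better_dice
-- ===== SOURCE A (Python) =====
-- def better_dice(n, first_die, second_die):
--     first_wins = 0
--     second_wins = 0
--
--     for i in range(n):
--         for j in range(n):
--             if first_die[i] > second_die[j]:
--                 first_wins += 1
--             elif first_die[i] < second_die[j]:
--                 second_wins += 1
--
--     if first_wins > second_wins:
--         return "first"
--     elif second_wins > first_wins:
--         return "second"
--     else:
--         return "tie"
-- ===== SOURCE B (Python) =====
-- def _bisect_left(s, x):
--     lo, hi = 0, len(s)
--     while lo < hi: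
--         mid = (lo + hi) // 2
--         if s[mid] < x:
--             lo = mid + 1
--         else:
--             hi = mid
--     return lo
--
--
-- def _bisect_right(s, x):
--     lo, hi = 0, len(s)
--     while lo < hi:
--         mid = (lo + hi) // 2
--         if s[mid] <= x:
--             lo = mid + 1
--         else:
--             hi = mid
--     return lo
--
--
-- def better_dice(n, first_die, second_die):
--     m = max(n, 0)
--     s = sorted(second_die[:m])
--     diff = 0
--     for x in first_die[:m]:
--         diff += _bisect_left(s, x) - (len(s) - _bisect_right(s, x))
--     if diff > 0:
--         return "first"
--     if diff < 0:
--         return "second"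
--     return "tie"
-- ===== Notes on version B (the rewrite author's own statement) =====
-- stated objective: faster
-- what changed: Replaces the quadratic nested face-by-face comparison with sorting the second die once and binary-searching (hand-written bisect) each first-die face to count smaller/larger faces.
import Mathlib
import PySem

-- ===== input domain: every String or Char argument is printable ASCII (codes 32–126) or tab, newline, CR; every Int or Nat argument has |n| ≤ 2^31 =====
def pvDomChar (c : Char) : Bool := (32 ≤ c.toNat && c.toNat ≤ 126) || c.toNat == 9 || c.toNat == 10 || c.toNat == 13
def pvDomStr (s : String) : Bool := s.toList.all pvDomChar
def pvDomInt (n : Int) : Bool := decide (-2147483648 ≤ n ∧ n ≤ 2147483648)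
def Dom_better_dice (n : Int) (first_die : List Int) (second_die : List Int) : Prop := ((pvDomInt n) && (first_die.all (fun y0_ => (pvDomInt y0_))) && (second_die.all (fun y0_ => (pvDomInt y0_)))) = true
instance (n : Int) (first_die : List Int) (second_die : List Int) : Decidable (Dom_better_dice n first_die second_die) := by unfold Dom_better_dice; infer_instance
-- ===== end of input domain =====

-- B sorts the first n faces of the second die once and binary-searches each first-die face
-- to count smaller/larger faces (O(n log n)) instead of A's nested O(n^2) comparison loops.

-- ===== PORT A =====
def better_dice (n : Int) (first_die : List Int) (second_die : List Int) : String :=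
  let p := (PySem.List.pyRange 0 n 1).foldl (fun acc i =>
    (PySem.List.pyRange 0 n 1).foldl (fun acc2 j =>
      if PySem.List.pyGetD first_die i 0 > PySem.List.pyGetD second_die j 0 then (acc2.1 + 1, acc2.2)
      else if PySem.List.pyGetD first_die i 0 < PySem.List.pyGetD second_die j 0 then (acc2.1, acc2.2 + 1)
      else acc2) acc) ((0 : Int), (0 : Int))
  if p.1 > p.2 then "first" else if p.2 > p.1 then "second" else "tie"

-- ===== PORT B =====
-- Source B's hand-written _bisect_left/_bisect_right are exactly Python's bisect_left/bisect_right
-- loops; PySem.List.bisectLeft/bisectRight are that very lo/hi/mid loop, so the port cites them.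
def better_dice_alt (n : Int) (first_die : List Int) (second_die : List Int) : String :=
  let m : Int := max n 0
  let s := PySem.List.sorted (PySem.List.slice second_die none (some m)) (fun x => x) false
  let diff := (PySem.List.slice first_die none (some m)).foldl
    (fun acc x => acc + ((PySem.List.bisectLeft s x : Int) - ((s.length : Int) - (PySem.List.bisectRight s x : Int)))) (0 : Int)
  if diff > 0 then "first" else if diff < 0 then "second" else "tie"

-- ===== PRECONDITION & SPEC =====
-- A raises IndexError iff n exceeds the length of either die list; those inputs are excluded.
def Pre_better_dice (n : Int) (first_die : List Int) (second_die : List Int) : Prop :=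
  n ≤ (first_die.length : Int) ∧ n ≤ (second_die.length : Int)
instance (n : Int) (first_die : List Int) (second_die : List Int) : Decidable (Pre_better_dice n first_die second_die) := by unfold Pre_better_dice; infer_instance
def pvWitness_better_dice : Int × List Int × List Int := (2, [3, 1], [2, 2])

def Spec_better_dice (n : Int) (first_die : List Int) (second_die : List Int) (out : String) : Prop := out = better_dice_alt n first_die second_die
instance (n : Int) (first_die : List Int) (second_die : List Int) (out : String) : Decidable (Spec_better_dice n first_die second_die out) := by unfold Spec_better_dice; infer_instance

-- ===== CLAIM (what is proved, stated in full; the proofs are below) =====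
def Claim_equal_better_dice : Prop := ∀ (n : Int) (first_die : List Int) (second_die : List Int), Dom_better_dice n first_die second_die → Pre_better_dice n first_die second_die → Spec_better_dice n first_die second_die (better_dice n first_die second_die)

-- ===== LEMMAS AND PROOFS =====

-- number of elements with value < x (resp. > x), as an Int
def pvCLt (S : List Int) (x : Int) : Int := (S.countP (fun y => decide (y < x)) : Int)
def pvCGt (S : List Int) (x : Int) : Int := (S.countP (fun y => decide (x < y)) : Int)

-- countP of a list whose predicate holds exactly on the first r positions is r
theorem pv_countP_boundary (l : List Int) (p : Int → Bool) (r : Nat) (hr : r ≤ l.length)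
    (h1 : ∀ (j : Nat) (hj : j < l.length), j < r → p l[j])
    (h2 : ∀ (j : Nat) (hj : j < l.length), r ≤ j → ¬ p l[j]) :
    l.countP p = r := by
  have ht : (l.take r).countP p = (l.take r).length := by
    rw [List.countP_eq_length]
    intro a ha
    obtain ⟨i, hi, rfl⟩ := List.mem_iff_getElem.mp ha
    have hi' : i < r ∧ i < l.length := by simp [List.length_take] at hi; omega
    rw [List.getElem_take]
    exact h1 i hi'.2 hi'.1
  have hd : (l.drop r).countP p = 0 := by
    rw [List.countP_eq_zero]
    intro a ha
    obtain ⟨i, hi, rfl⟩ := List.mem_iff_getElem.mp ha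
    rw [List.getElem_drop]
    exact h2 (r + i) (by simp [List.length_drop] at hi; omega) (by omega)
  have := List.take_append_drop r l
  calc l.countP p = ((l.take r) ++ (l.drop r)).countP p := by rw [this]
    _ = (l.take r).countP p + (l.drop r).countP p := List.countP_append
    _ = r := by rw [ht, hd, List.length_take]; omega

theorem pv_bisectLeft_count (xs : List Int) (x : Int)
    (h : xs.Pairwise (fun a b => a ≤ b)) :
    PySem.List.bisectLeft xs x = xs.countP (fun y => decide (y < x)) := by
  obtain ⟨hle, hlt, hge⟩ := PySem.List.bisectLeft_spec xs x h
  exact (pv_countP_boundary xs (fun y => decide (y < x)) (PySem.List.bisectLeft xs x) hle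
    (fun j hj hjr => by simpa using hlt j hj hjr)
    (fun j hj hjr => by simpa using not_lt.mpr (hge j hj hjr))).symm

theorem pv_bisectRight_count (xs : List Int) (x : Int)
    (h : xs.Pairwise (fun a b => a ≤ b)) :
    PySem.List.bisectRight xs x = xs.countP (fun y => decide (y ≤ x)) := by
  obtain ⟨hle, hlt, hge⟩ := PySem.List.bisectRight_spec xs x h
  exact (pv_countP_boundary xs (fun y => decide (y ≤ x)) (PySem.List.bisectRight xs x) hle
    (fun j hj hjr => by simpa using hlt j hj hjr)
    (fun j hj hjr => by simpa using not_le.mpr (hge j hj hjr))).symm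

-- a fold over range(n) indexing xs is a fold over xs.take n (n ≤ len xs)
theorem pv_foldl_pyRange_take {β : Type} (xs : List Int) (n : Int) (hn : n ≤ (xs.length : Int))
    (g : β → Int → β) (init : β) :
    (PySem.List.pyRange 0 n 1).foldl (fun acc i => g acc (PySem.List.pyGetD xs i 0)) init
      = (xs.take n.toNat).foldl g init := by
  by_cases hn0 : n ≤ 0
  · rw [PySem.List.pyRange_one_eq_nil (by omega)]
    have h0 : n.toNat = 0 := by omega
    simp [h0]
  · have hpos : 0 < n := by omega
    have hml : n.toNat ≤ xs.length := by omega
    have hlen : ((xs.take n.toNat).length : Int) = n := by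
      rw [List.length_take]; omega
    have hcongr : ∀ (acc : β) (i : Int), i ∈ PySem.List.pyRange 0 n 1 →
        g acc (PySem.List.pyGetD xs i 0) = g acc (PySem.List.pyGetD (xs.take n.toNat) i 0) := by
      intro acc i hi
      rw [PySem.List.mem_pyRange_one] at hi
      rw [PySem.List.pyGetD_eq_getElem xs 0 hi.1 (by omega),
          PySem.List.pyGetD_eq_getElem (xs.take n.toNat) 0 hi.1 (by rw [hlen]; omega)]
      rw [List.getElem_take]
    rw [PySem.List.foldl_congr_mem _ _ _ _ hcongr]
    generalize hT : xs.take n.toNat = t at hlen ⊢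
    conv_lhs => rw [← hlen]
    exact PySem.List.foldl_pyRange_zero_pyGetD' t 0 g init

-- the inner loop of A counts faces of S below/above x
theorem pv_inner (S : List Int) (x : Int) (acc : Int × Int) :
    S.foldl (fun acc2 y =>
      if x > y then (acc2.1 + 1, acc2.2)
      else if x < y then (acc2.1, acc2.2 + 1)
      else acc2) acc = (acc.1 + pvCLt S x, acc.2 + pvCGt S x) := by
  have hcongr : ∀ (acc2 : Int × Int) (y : Int), y ∈ S →
      (if x > y then (acc2.1 + 1, acc2.2)
       else if x < y then (acc2.1, acc2.2 + 1)
       else acc2)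
      = (if y < x then acc2.1 + 1 else acc2.1, if x < y then acc2.2 + 1 else acc2.2) := by
    intro acc2 y _
    by_cases h1 : x > y <;> by_cases h2 : x < y <;> (simp [h1, h2]; try omega)
  obtain ⟨a1, a2⟩ := acc
  rw [PySem.List.foldl_congr_mem _ _ _ _ hcongr,
      PySem.List.foldl_prod_mk (f := fun a y => if y < x then a + 1 else a)
        (g := fun a y => if x < y then a + 1 else a)]
  unfold pvCLt pvCGt
  rw [PySem.List.foldl_ite_add_one (p := fun y => y < x),
      PySem.List.foldl_ite_add_one (p := fun y => x < y)]

-- the outer loop of A sums those counts over F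
theorem pv_outer (F S : List Int) :
    F.foldl (fun acc x => (acc.1 + pvCLt S x, acc.2 + pvCGt S x)) ((0 : Int), (0 : Int))
      = ((F.map (pvCLt S)).sum, (F.map (pvCGt S)).sum) := by
  rw [PySem.List.foldl_prod_mk (f := fun a x => a + pvCLt S x) (g := fun a x => a + pvCGt S x),
      PySem.List.foldl_add, PySem.List.foldl_add]
  simp

theorem pv_sum_map_sub (F : List Int) (u v : Int → Int) :
    (F.map (fun x => u x - v x)).sum = (F.map u).sum - (F.map v).sum := by
  induction F with
  | nil => simp
  | cons h t ih => simp only [List.map_cons, List.sum_cons, ih]; ring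

-- faces ≤ x and faces > x partition the list
theorem pv_count_split (S : List Int) (x : Int) :
    S.countP (fun y => decide (y ≤ x)) + S.countP (fun y => decide (x < y)) = S.length := by
  induction S with
  | nil => simp
  | cons h t ih =>
      by_cases hx : h ≤ x
      · rw [List.countP_cons_of_pos (by simpa using hx),
            List.countP_cons_of_neg (by simpa using not_lt.mpr hx)]
        simp only [List.length_cons]
        omega
      · rw [List.countP_cons_of_neg (by simpa using hx),
            List.countP_cons_of_pos (by simpa using not_le.mp hx)]
        simp only [List.length_cons]
        omega

-- B's per-face binary-search count equals the scan counts
theorem pv_bisect_term (S : List Int) (x : Int) :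
    (PySem.List.bisectLeft (PySem.List.sorted S (fun x => x) false) x : Int)
      - (((PySem.List.sorted S (fun x => x) false).length : Int)
         - (PySem.List.bisectRight (PySem.List.sorted S (fun x => x) false) x : Int))
      = pvCLt S x - pvCGt S x := by
  have hp : (PySem.List.sorted S (fun x => x) false).Pairwise (fun a b => a ≤ b) := by
    simpa using PySem.List.sorted_pairwise S (fun x => x)
  have hperm : (PySem.List.sorted S (fun x => x) false).Perm S :=
    PySem.List.sorted_perm S (fun x => x) false
  rw [pv_bisectLeft_count _ _ hp, pv_bisectRight_count _ _ hp,
      hperm.countP_eq, hperm.countP_eq, hperm.length_eq]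
  have hsum := pv_count_split S x
  unfold pvCLt pvCGt
  omega

-- ===== VERDICT (by name: the statement is the Claim_ definition above) =====
theorem better_dice_spec : Claim_equal_better_dice := by
  intro n f s _ hpre
  obtain ⟨h1, h2⟩ := hpre
  unfold Spec_better_dice
  simp only [better_dice, better_dice_alt]
  rw [pv_foldl_pyRange_take f n h1
      (fun acc x => (PySem.List.pyRange 0 n 1).foldl (fun acc2 j =>
        if x > PySem.List.pyGetD s j 0 then (acc2.1 + 1, acc2.2)
        else if x < PySem.List.pyGetD s j 0 then (acc2.1, acc2.2 + 1)
        else acc2) acc) ((0 : Int), (0 : Int))]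
  have hcongr : ∀ (acc : Int × Int) (x : Int), x ∈ f.take n.toNat →
      (PySem.List.pyRange 0 n 1).foldl (fun acc2 j =>
        if x > PySem.List.pyGetD s j 0 then (acc2.1 + 1, acc2.2)
        else if x < PySem.List.pyGetD s j 0 then (acc2.1, acc2.2 + 1)
        else acc2) acc
      = (acc.1 + pvCLt (s.take n.toNat) x, acc.2 + pvCGt (s.take n.toNat) x) := by
    intro acc x _
    rw [pv_foldl_pyRange_take s n h2
        (fun acc2 y =>
          if x > y then (acc2.1 + 1, acc2.2)
          else if x < y then (acc2.1, acc2.2 + 1)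
          else acc2) acc]
    exact pv_inner (s.take n.toNat) x acc
  rw [PySem.List.foldl_congr_mem _ _ _ _ hcongr, pv_outer]
  -- B side
  have hbf : PySem.List.slice f none (some (max n 0)) = f.take n.toNat := by
    rw [PySem.List.slice_to f (le_max_right n 0)]
    congr 1
    omega
  have hbs : PySem.List.slice s none (some (max n 0)) = s.take n.toNat := by
    rw [PySem.List.slice_to s (le_max_right n 0)]
    congr 1
    omega
  have hdiff : (f.take n.toNat).foldl
      (fun acc x => acc + ((PySem.List.bisectLeft (PySem.List.sorted (s.take n.toNat) (fun x => x) false) x : Int)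
        - (((PySem.List.sorted (s.take n.toNat) (fun x => x) false).length : Int)
           - (PySem.List.bisectRight (PySem.List.sorted (s.take n.toNat) (fun x => x) false) x : Int)))) (0 : Int)
      = ((f.take n.toNat).map (pvCLt (s.take n.toNat))).sum
        - ((f.take n.toNat).map (pvCGt (s.take n.toNat))).sum := by
    rw [PySem.List.foldl_add]
    simp only [pv_bisect_term]
    rw [pv_sum_map_sub _ (pvCLt (s.take n.toNat)) (pvCGt (s.take n.toNat))]
    simp
  simp only [hbf, hbs, hdiff]
  split_ifs <;> first | rfl | omega
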